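-- pv_equiv track=rewrite | github.com/yutaiyes/myweb | .codebuddy/skills/ui-ux-pro-max/scripts/design_system.py | _select_best_color
-- ===== SOURCE A (Python) =====
-- def _select_best_color(results: list, color_mood: str, query: str) -> dict:
--     """Select best color palette based on color mood and query keywords.
--
--     Scores candidates by matching color mood keywords against the Notes field
--     and Product Type field, rather than blindly taking the first BM25 result.
--     """
--     if not results:
--         return {}
--
--     if not color_mood and not query:
--         return results[0]
--
--     # Build keyword list from color_mood and query
--     mood_keywords = [kw.strip().lower() for kw in (color_mood or "").replace("+", " ").replace(",", " ").split() if kw.strip()]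
--     query_keywords = [kw.strip().lower() for kw in query.split() if len(kw.strip()) > 2]
--     all_keywords = mood_keywords + query_keywords
--
--     if not all_keywords:
--         return results[0]
--
--     scored = []
--     for result in results:
--         notes = result.get("Notes", "").lower()
--         product_type = result.get("Product Type", "").lower()
--         score = 0
--
--         for kw in all_keywords:
--             # High score for product type match
--             if kw in product_type:
--                 score += 10
--             # Medium score for notes match (color mood description)
--             if kw in notes:
--                 score += 5
--
--         scored.append((score, result))
--
--     scored.sort(key=lambda x: x[0], reverse=True)
--     return scored[0][1] if scored and scored[0][0] > 0 else results[0]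
-- ===== SOURCE B (Python) =====
-- def _select_best_color(results: list, color_mood: str, query: str) -> dict:
--     """Single-pass selection: track the best-scoring candidate instead of
--     building a scored list and stable-sorting it."""
--     if not results:
--         return {}
--     if not color_mood and not query:
--         return results[0]
--     mood_keywords = [kw.strip().lower() for kw in (color_mood or "").replace("+", " ").replace(",", " ").split() if kw.strip()]
--     query_keywords = [kw.strip().lower() for kw in query.split() if len(kw.strip()) > 2]
--     all_keywords = mood_keywords + query_keywords
--     if not all_keywords:
--         return results[0]
--     best_score, best = 0, results[0]
--     for result in results:
--         notes = result.get("Notes", "").lower()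
--         product_type = result.get("Product Type", "").lower()
--         score = sum((10 if kw in product_type else 0) + (5 if kw in notes else 0) for kw in all_keywords)
--         if score > best_score:
--             best_score, best = score, result
--     return best
-- ===== Notes on version B (the rewrite author's own statement) =====
-- stated objective: simpler
-- what changed: Replaces building a (score, result) list and stable reverse-sorting it with a single pass that keeps the strictly-best-scoring candidate (ties and all-zero scores fall back to results[0], exactly matching the stable sort plus the >0 guard), and computes each score as a sum instead of an accumulator loop.
import Mathlib
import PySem

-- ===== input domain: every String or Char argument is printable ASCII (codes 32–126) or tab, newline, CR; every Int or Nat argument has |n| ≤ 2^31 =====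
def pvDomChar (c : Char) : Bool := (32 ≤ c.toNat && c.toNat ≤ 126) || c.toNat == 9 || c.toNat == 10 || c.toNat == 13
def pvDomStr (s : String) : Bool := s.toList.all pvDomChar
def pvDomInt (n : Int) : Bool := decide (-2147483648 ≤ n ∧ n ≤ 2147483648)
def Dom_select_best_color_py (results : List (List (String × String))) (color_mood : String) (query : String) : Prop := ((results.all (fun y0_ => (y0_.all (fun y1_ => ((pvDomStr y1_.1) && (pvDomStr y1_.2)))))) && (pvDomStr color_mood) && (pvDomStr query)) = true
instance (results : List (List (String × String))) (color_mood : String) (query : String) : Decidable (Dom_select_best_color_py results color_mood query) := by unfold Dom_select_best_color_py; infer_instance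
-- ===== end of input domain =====

-- B replaces A's scored-list + stable reverse sort + head with a single pass keeping the
-- strictly-best candidate (same result; objective: simpler).

-- ===== PORT A =====
-- keyword-building lines are textually identical in Source A and Source B, so both ports share them
def pvAllKeywords (color_mood : String) (query : String) : List String :=
  let mood_keywords :=
    (((PySem.Str.split₀ (PySem.Str.replace (PySem.Str.replace
        (if PySem.Str.len color_mood == 0 then "" else color_mood) "+" " ") "," " ")).filter
      (fun kw => !(PySem.Str.len (PySem.Str.strip kw) == 0))).map
      (fun kw => PySem.Str.lower (PySem.Str.strip kw)))
  let query_keywords :=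
    (((PySem.Str.split₀ query).filter
      (fun kw => 2 < PySem.Str.len (PySem.Str.strip kw))).map
      (fun kw => PySem.Str.lower (PySem.Str.strip kw)))
  mood_keywords ++ query_keywords

-- result.get(key, "").lower(), shared by both ports (dict → assoc list, built as a Python dict)
def pvField (result : List (String × String)) (key : String) : String :=
  PySem.Str.lower (PySem.Dict.getD (PySem.Dict.ofList result) key "")

-- A's per-candidate scoring loop (accumulator over the keyword list)
def pvScoreA (all_keywords : List String) (result : List (String × String)) : Int :=
  let notes := pvField result "Notes"
  let product_type := pvField result "Product Type"
  all_keywords.foldl (fun score kw =>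
    let score := if PySem.Str.isIn kw product_type then score + 10 else score
    if PySem.Str.isIn kw notes then score + 5 else score) (0 : Int)

-- 'scored[0][1] if scored and scored[0][0] > 0 else results[0]'
def pvPick (sorted_scored : List (Int × List (String × String))) (r0 : List (String × String)) : List (String × String) :=
  match sorted_scored with
  | (s, r) :: _ => if 0 < s then r else r0
  | [] => r0

def select_best_color_py (results : List (List (String × String))) (color_mood : String) (query : String) : List (String × String) :=
  match results with
  | [] => []
  | r0 :: _ =>
    if PySem.Str.len color_mood == 0 && PySem.Str.len query == 0 then r0
    else
      let all_keywords := pvAllKeywords color_mood query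
      if all_keywords.isEmpty then r0
      else
        let scored := results.map (fun result => (pvScoreA all_keywords result, result))
        pvPick (PySem.List.sorted scored (fun x => x.1) true) r0

-- ===== PORT B =====
-- B's per-candidate score: a sum over the keyword list
def pvScoreB (all_keywords : List String) (result : List (String × String)) : Int :=
  let notes := pvField result "Notes"
  let product_type := pvField result "Product Type"
  (all_keywords.map (fun kw =>
    (if PySem.Str.isIn kw product_type then (10 : Int) else 0) +
    (if PySem.Str.isIn kw notes then (5 : Int) else 0))).sum

def select_best_color_py_alt (results : List (List (String × String))) (color_mood : String) (query : String) : List (String × String) :=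
  match results with
  | [] => []
  | r0 :: _ =>
    if PySem.Str.len color_mood == 0 && PySem.Str.len query == 0 then r0
    else
      let all_keywords := pvAllKeywords color_mood query
      if all_keywords.isEmpty then r0
      else
        (results.foldl (fun acc result =>
          let score := pvScoreB all_keywords result
          if acc.1 < score then (score, result) else acc) ((0 : Int), r0)).2

-- ===== PRECONDITION & SPEC =====
def Spec_select_best_color_py (results : List (List (String × String))) (color_mood : String) (query : String) (out : List (String × String)) : Prop := out = select_best_color_py_alt results color_mood query
instance (results : List (List (String × String))) (color_mood : String) (query : String) (out : List (String × String)) : Decidable (Spec_select_best_color_py results color_mood query out) := by unfold Spec_select_best_color_py; infer_instance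

-- ===== CLAIM (what is proved, stated in full; the proofs are below) =====
def Claim_equal_select_best_color_py : Prop := ∀ (results : List (List (String × String))) (color_mood : String) (query : String), Dom_select_best_color_py results color_mood query → Spec_select_best_color_py results color_mood query (select_best_color_py results color_mood query)

-- ===== LEMMAS AND PROOFS =====

-- A's score accumulator equals B's sum form (generalised over the accumulator)
lemma pvScore_fold_eq_sum (pt notes : String) : ∀ (kws : List String) (a : Int),
    kws.foldl (fun score kw =>
      let score := if PySem.Str.isIn kw pt then score + 10 else score
      if PySem.Str.isIn kw notes then score + 5 else score) a
    = a + (kws.map (fun kw =>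
        (if PySem.Str.isIn kw pt then (10 : Int) else 0) +
        (if PySem.Str.isIn kw notes then (5 : Int) else 0))).sum := by
  intro kws
  induction kws with
  | nil => intro a; simp
  | cons kw t ih =>
    intro a
    simp only [List.foldl_cons, List.map_cons, List.sum_cons, ih]
    split_ifs <;> ring

lemma pvScoreA_eq_B (kws : List String) (r : List (String × String)) :
    pvScoreA kws r = pvScoreB kws r := by
  unfold pvScoreA pvScoreB
  exact pvScore_fold_eq_sum _ _ kws 0 |>.trans (by ring_nf)

lemma pvScoreB_nonneg (kws : List String) (r : List (String × String)) :
    0 ≤ pvScoreB kws r := by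
  unfold pvScoreB
  apply List.sum_nonneg
  intro x hx
  simp only [List.mem_map] at hx
  obtain ⟨kw, -, rfl⟩ := hx
  split_ifs <;> norm_num

-- head of the descending stable-sort foldl-insertBy form is the strict first-max fold
lemma pvHead_foldl_insertBy {β : Type} : ∀ (xs : List (Int × β)) (h : Int × β) (t : List (Int × β)),
    (xs.foldl (fun acc x => PySem.List.insertBy (fun a b => decide (b.1 < a.1)) x acc) (h :: t)).head?
    = some (xs.foldl (fun a x => if a.1 < x.1 then x else a) h) := by
  intro xs
  induction xs with
  | nil => intro h t; rfl
  | cons x xs ih =>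
    intro h t
    simp only [List.foldl_cons, PySem.List.insertBy]
    by_cases hlt : h.1 < x.1
    · simp only [hlt, decide_true, if_pos]
      exact ih x (h :: t)
    · simp only [hlt, decide_false, Bool.false_eq_true, if_false]
      exact ih h _

lemma pvHead_sorted_rev {β : Type} (p : Int × β) (xs : List (Int × β)) :
    (PySem.List.sorted (p :: xs) (fun x => x.1) true).head?
    = some (xs.foldl (fun a x => if a.1 < x.1 then x else a) p) := by
  rw [PySem.List.sorted_rev_eq_foldl_insertBy]
  simp only [List.foldl_cons]
  exact pvHead_foldl_insertBy xs p []

-- the strict first-max fold never decreases, and stays put when it does not increase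
lemma pvFmax_ge {β : Type} : ∀ (xs : List (Int × β)) (a : Int × β),
    a.1 ≤ (xs.foldl (fun a x => if a.1 < x.1 then x else a) a).1
    ∧ ((xs.foldl (fun a x => if a.1 < x.1 then x else a) a).1 ≤ a.1 →
        xs.foldl (fun a x => if a.1 < x.1 then x else a) a = a) := by
  intro xs
  induction xs with
  | nil => intro a; exact ⟨le_refl _, fun _ => rfl⟩
  | cons x xs ih =>
    intro a
    simp only [List.foldl_cons]
    by_cases hlt : a.1 < x.1
    · simp only [if_pos hlt]
      refine ⟨le_trans (le_of_lt hlt) (ih x).1,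
        fun hle => absurd (lt_of_lt_of_le hlt (le_trans (ih x).1 hle)) (lt_irrefl _)⟩
    · simp only [if_neg hlt]
      exact ih a

-- core: head of stable descending sort with the >0 fallback = single-pass strict best
lemma pvCore (f : List (String × String) → Int) (hf : ∀ r, 0 ≤ f r)
    (r0 : List (String × String)) (rest : List (List (String × String))) :
    pvPick (PySem.List.sorted ((r0 :: rest).map (fun r => (f r, r))) (fun x => x.1) true) r0
    = ((r0 :: rest).foldl (fun acc r =>
        if acc.1 < f r then (f r, r) else acc) ((0 : Int), r0)).2 := by
  have hhead := pvHead_sorted_rev (f r0, r0) (rest.map (fun r => (f r, r)))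
  have hstep : ((r0 :: rest).foldl (fun acc r =>
      if acc.1 < f r then (f r, r) else acc) ((0 : Int), r0))
      = rest.foldl (fun acc r => if acc.1 < f r then (f r, r) else acc) (f r0, r0) := by
    simp only [List.foldl_cons]
    congr 1
    by_cases h0 : (0 : Int) < f r0
    · simp [h0]
    · have hz : f r0 = 0 := le_antisymm (not_lt.mp h0) (hf r0)
      simp [hz]
  have hfold : rest.foldl (fun acc r => if acc.1 < f r then (f r, r) else acc) (f r0, r0)
      = (rest.map (fun r => (f r, r))).foldl (fun a x => if a.1 < x.1 then x else a) (f r0, r0) := by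
    rw [List.foldl_map]
  simp only [List.map_cons]
  rw [hstep, hfold]
  rcases hs : PySem.List.sorted ((f r0, r0) :: rest.map (fun r => (f r, r))) (fun x => x.1) true
    with _ | ⟨⟨s, r⟩, tail⟩
  · rw [hs] at hhead; simp at hhead
  · rw [hs] at hhead
    simp only [List.head?_cons, Option.some.injEq] at hhead
    show (if 0 < s then r else r0) = _
    by_cases hpos : 0 < s
    · have hrm : r = ((rest.map (fun r => (f r, r))).foldl
          (fun a x => if a.1 < x.1 then x else a) (f r0, r0)).2 := by rw [← hhead]
      rw [if_pos hpos, hrm]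
    · rw [if_neg hpos]
      have hsm : s = ((rest.map (fun r => (f r, r))).foldl
          (fun a x => if a.1 < x.1 then x else a) (f r0, r0)).1 := by rw [← hhead]
      have h2 := (pvFmax_ge (rest.map (fun r => (f r, r))) (f r0, r0)).2
      have hle : ((rest.map (fun r => (f r, r))).foldl
          (fun a x => if a.1 < x.1 then x else a) (f r0, r0)).1 ≤ (f r0, r0).1 := by
        have h0 := hf r0
        show _ ≤ f r0
        omega
      rw [h2 hle]

-- ===== VERDICT (by name: the statement is the Claim_ definition above) =====
theorem select_best_color_py_spec : Claim_equal_select_best_color_py := by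
  intro results color_mood query _
  unfold Spec_select_best_color_py
  cases results with
  | nil => rfl
  | cons r0 rest =>
    simp only [select_best_color_py, select_best_color_py_alt]
    split_ifs with h1 h2
    · rfl
    · rfl
    · simp only [pvScoreA_eq_B]
      exact pvCore (pvScoreB (pvAllKeywords color_mood query))
        (pvScoreB_nonneg (pvAllKeywords color_mood query)) r0 rest
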